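-- pv_equiv track=rewrite | github.com/cmungall-lbl/py-boomer | src/boomer/renderers/sssom_renderer.py | _collect_prefixes
-- ===== SOURCE A (Python) =====
-- _KNOWN_PREFIX_MAP: dict[str, str] = {
--     "HP": "http://purl.obolibrary.org/obo/HP_",
--     "MP": "http://purl.obolibrary.org/obo/MP_",
--     "MONDO": "http://purl.obolibrary.org/obo/MONDO_",
--     "OMIM": "https://omim.org/entry/",
--     "ORDO": "http://www.orpha.net/ORDO/Orphanet_",
--     "DOID": "http://purl.obolibrary.org/obo/DOID_",
--     "NCIT": "http://purl.obolibrary.org/obo/NCIT_",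
--     "GO": "http://purl.obolibrary.org/obo/GO_",
--     "CL": "http://purl.obolibrary.org/obo/CL_",
--     "UBERON": "http://purl.obolibrary.org/obo/UBERON_",
--     "CHEBI": "http://purl.obolibrary.org/obo/CHEBI_",
--     "ZFA": "http://purl.obolibrary.org/obo/ZFA_",
--     "FBbt": "http://purl.obolibrary.org/obo/FBbt_",
--     "WBbt": "http://purl.obolibrary.org/obo/WBbt_",
--     "MA": "http://purl.obolibrary.org/obo/MA_",
--     "EMAPA": "http://purl.obolibrary.org/obo/EMAPA_",
--     "BFO": "http://purl.obolibrary.org/obo/BFO_",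
--     "BTO": "http://purl.obolibrary.org/obo/BTO_",
--     "skos": "http://www.w3.org/2004/02/skos/core#",
--     "owl": "http://www.w3.org/2002/07/owl#",
--     "rdfs": "http://www.w3.org/2000/01/rdf-schema#",
--     "semapv": "https://w3id.org/semapv/vocab/",
-- }
--
-- def _collect_prefixes(entities: set[str]) -> dict[str, str]:
--     """Build a curie_map from entity prefixes present in the data."""
--     curie_map: dict[str, str] = {}
--     for entity in entities:
--         parts = entity.split(":")
--         if len(parts) >= 2:
--             prefix = parts[0]
--             if prefix in _KNOWN_PREFIX_MAP and prefix not in curie_map: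
--                 curie_map[prefix] = _KNOWN_PREFIX_MAP[prefix]
--     # Always include the standard predicate prefixes
--     for p in ("skos", "semapv"):
--         if p not in curie_map:
--             curie_map[p] = _KNOWN_PREFIX_MAP[p]
--     return dict(sorted(curie_map.items()))
-- ===== SOURCE B (Python) =====
-- _KNOWN_PREFIX_MAP: dict[str, str] = {
--     "HP": "http://purl.obolibrary.org/obo/HP_",
--     "MP": "http://purl.obolibrary.org/obo/MP_",
--     "MONDO": "http://purl.obolibrary.org/obo/MONDO_",
--     "OMIM": "https://omim.org/entry/",
--     "ORDO": "http://www.orpha.net/ORDO/Orphanet_",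
--     "DOID": "http://purl.obolibrary.org/obo/DOID_",
--     "NCIT": "http://purl.obolibrary.org/obo/NCIT_",
--     "GO": "http://purl.obolibrary.org/obo/GO_",
--     "CL": "http://purl.obolibrary.org/obo/CL_",
--     "UBERON": "http://purl.obolibrary.org/obo/UBERON_",
--     "CHEBI": "http://purl.obolibrary.org/obo/CHEBI_",
--     "ZFA": "http://purl.obolibrary.org/obo/ZFA_",
--     "FBbt": "http://purl.obolibrary.org/obo/FBbt_",
--     "WBbt": "http://purl.obolibrary.org/obo/WBbt_",
--     "MA": "http://purl.obolibrary.org/obo/MA_",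
--     "EMAPA": "http://purl.obolibrary.org/obo/EMAPA_",
--     "BFO": "http://purl.obolibrary.org/obo/BFO_",
--     "BTO": "http://purl.obolibrary.org/obo/BTO_",
--     "skos": "http://www.w3.org/2004/02/skos/core#",
--     "owl": "http://www.w3.org/2002/07/owl#",
--     "rdfs": "http://www.w3.org/2000/01/rdf-schema#",
--     "semapv": "https://w3id.org/semapv/vocab/",
-- }
--
--
-- def _collect_prefixes(entities: set[str]) -> dict[str, str]:
--     """Build a curie_map from entity prefixes present in the data."""
--     present = {e.split(":")[0] for e in entities if ":" in e}
--     curie_map = {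
--         k: v
--         for k, v in _KNOWN_PREFIX_MAP.items()
--         if k in present or k in ("skos", "semapv")
--     }
--     return dict(sorted(curie_map.items()))
-- ===== Notes on version B (the rewrite author's own statement) =====
-- stated objective: simpler
-- what changed: Instead of looping over the entities and growing the dict with a 'not in curie_map' dedup check (plus a second fix-up loop for skos/semapv), B builds the set of prefixes present in the data once and then filters the constant _KNOWN_PREFIX_MAP table, so the output dict is assembled by a single pass over the 22 known prefixes.
import Mathlib
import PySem

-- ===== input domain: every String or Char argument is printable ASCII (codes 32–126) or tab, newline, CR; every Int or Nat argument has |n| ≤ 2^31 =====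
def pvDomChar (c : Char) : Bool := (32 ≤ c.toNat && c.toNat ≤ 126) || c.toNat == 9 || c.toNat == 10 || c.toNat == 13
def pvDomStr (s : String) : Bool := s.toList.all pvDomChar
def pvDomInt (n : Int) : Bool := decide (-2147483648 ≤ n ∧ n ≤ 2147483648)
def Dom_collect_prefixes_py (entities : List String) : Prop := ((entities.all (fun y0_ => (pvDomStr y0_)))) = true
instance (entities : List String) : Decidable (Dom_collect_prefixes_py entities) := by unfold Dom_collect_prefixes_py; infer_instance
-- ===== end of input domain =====

-- B replaces A's entity loop (with its 'not in curie_map' dedup check and fix-up loop) by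
-- building the set of prefixes present once and filtering the constant known-prefix table.

-- ===== PORT A =====
-- module constant _KNOWN_PREFIX_MAP (used by both versions, like the Python module constant)
def kpMap : PySem.Dict String String := PySem.Dict.ofList [
   ("HP", "http://purl.obolibrary.org/obo/HP_"),
   ("MP", "http://purl.obolibrary.org/obo/MP_"),
   ("MONDO", "http://purl.obolibrary.org/obo/MONDO_"),
   ("OMIM", "https://omim.org/entry/"),
   ("ORDO", "http://www.orpha.net/ORDO/Orphanet_"),
   ("DOID", "http://purl.obolibrary.org/obo/DOID_"),
   ("NCIT", "http://purl.obolibrary.org/obo/NCIT_"),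
   ("GO", "http://purl.obolibrary.org/obo/GO_"),
   ("CL", "http://purl.obolibrary.org/obo/CL_"),
   ("UBERON", "http://purl.obolibrary.org/obo/UBERON_"),
   ("CHEBI", "http://purl.obolibrary.org/obo/CHEBI_"),
   ("ZFA", "http://purl.obolibrary.org/obo/ZFA_"),
   ("FBbt", "http://purl.obolibrary.org/obo/FBbt_"),
   ("WBbt", "http://purl.obolibrary.org/obo/WBbt_"),
   ("MA", "http://purl.obolibrary.org/obo/MA_"),
   ("EMAPA", "http://purl.obolibrary.org/obo/EMAPA_"),
   ("BFO", "http://purl.obolibrary.org/obo/BFO_"),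
   ("BTO", "http://purl.obolibrary.org/obo/BTO_"),
   ("skos", "http://www.w3.org/2004/02/skos/core#"),
   ("owl", "http://www.w3.org/2002/07/owl#"),
   ("rdfs", "http://www.w3.org/2000/01/rdf-schema#"),
   ("semapv", "https://w3id.org/semapv/vocab/")]

-- body of A's first loop ('for entity in entities: …')
def stepA (curie_map : PySem.Dict String String) (entity : String) : PySem.Dict String String :=
  -- entity.split(":"): sep ":" is non-empty, so Str.split? is always `some` and getD [] is exact
  let parts := (PySem.Str.split? entity ":").getD []
  if 2 ≤ parts.length then
    -- parts[0]: parts is non-empty under the guard, so pyGetD … "" is exact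
    let pfx := PySem.List.pyGetD parts 0 ""
    if kpMap.contains pfx && !curie_map.contains pfx then
      curie_map.insert pfx (kpMap.getD pfx "")   -- _KNOWN_PREFIX_MAP[prefix]: key present under the guard, getD exact
    else curie_map
  else curie_map

-- body of A's second loop ('for p in ("skos", "semapv"): …')
def stepStd (curie_map : PySem.Dict String String) (p : String) : PySem.Dict String String :=
  if !curie_map.contains p then curie_map.insert p (kpMap.getD p "") else curie_map

def collect_prefixes_py (entities : List String) : List (String × String) :=
  let curie_map := entities.foldl stepA PySem.Dict.empty
  let curie_map := ["skos", "semapv"].foldl stepStd curie_map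
  -- dict(sorted(curie_map.items())): tuples compare lexicographically
  PySem.List.sorted2 curie_map.items (fun kv => kv.1) (fun kv => kv.2) false

-- ===== PORT B =====
def collect_prefixes_py_alt (entities : List String) : List (String × String) :=
  let present : PySem.Set String := PySem.Set.ofList
    ((entities.filter (fun e => PySem.Str.isIn ":" e)).map
      (fun e => PySem.List.pyGetD ((PySem.Str.split? e ":").getD []) 0 ""))
  -- dict comprehension over _KNOWN_PREFIX_MAP.items() = filter of the items list
  let curie_map := kpMap.items.filter
    (fun kv => PySem.Set.contains present kv.1 || (kv.1 == "skos" || kv.1 == "semapv"))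
  PySem.List.sorted2 curie_map (fun kv => kv.1) (fun kv => kv.2) false

-- ===== PRECONDITION & SPEC =====
def Spec_collect_prefixes_py (entities : List String) (out : List (String × String)) : Prop := out = collect_prefixes_py_alt entities
instance (entities : List String) (out : List (String × String)) : Decidable (Spec_collect_prefixes_py entities out) := by unfold Spec_collect_prefixes_py; infer_instance

-- ===== CLAIM (what is proved, stated in full; the proofs are below) =====
def Claim_equal_collect_prefixes_py : Prop := ∀ (entities : List String), Dom_collect_prefixes_py entities → Spec_collect_prefixes_py entities (collect_prefixes_py entities)

-- ===== LEMMAS AND PROOFS =====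

-- entity.split(":") and its first field, as both programs compute them
def pvParts (e : String) : List String := (PySem.Str.split? e ":").getD []
def pvPref (e : String) : String := PySem.List.pyGetD (pvParts e) 0 ""
-- the prefixes A's guard admits, in entity order
def pvPrefs (es : List String) : List String :=
  (es.filter (fun e => decide (2 ≤ (pvParts e).length))).map pvPref
-- the canonical key predicate both final dicts realise
def pvPB (es : List String) (k : String) : Bool :=
  decide (k ∈ pvPrefs es) || (k == "skos" || k == "semapv")
-- the known-prefix table in Python's sorted order
def sortedKp : List (String × String) := [
   ("BFO", "http://purl.obolibrary.org/obo/BFO_"),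
   ("BTO", "http://purl.obolibrary.org/obo/BTO_"),
   ("CHEBI", "http://purl.obolibrary.org/obo/CHEBI_"),
   ("CL", "http://purl.obolibrary.org/obo/CL_"),
   ("DOID", "http://purl.obolibrary.org/obo/DOID_"),
   ("EMAPA", "http://purl.obolibrary.org/obo/EMAPA_"),
   ("FBbt", "http://purl.obolibrary.org/obo/FBbt_"),
   ("GO", "http://purl.obolibrary.org/obo/GO_"),
   ("HP", "http://purl.obolibrary.org/obo/HP_"),
   ("MA", "http://purl.obolibrary.org/obo/MA_"),
   ("MONDO", "http://purl.obolibrary.org/obo/MONDO_"),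
   ("MP", "http://purl.obolibrary.org/obo/MP_"),
   ("NCIT", "http://purl.obolibrary.org/obo/NCIT_"),
   ("OMIM", "https://omim.org/entry/"),
   ("ORDO", "http://www.orpha.net/ORDO/Orphanet_"),
   ("UBERON", "http://purl.obolibrary.org/obo/UBERON_"),
   ("WBbt", "http://purl.obolibrary.org/obo/WBbt_"),
   ("ZFA", "http://purl.obolibrary.org/obo/ZFA_"),
   ("owl", "http://www.w3.org/2002/07/owl#"),
   ("rdfs", "http://www.w3.org/2000/01/rdf-schema#"),
   ("semapv", "https://w3id.org/semapv/vocab/"),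
   ("skos", "http://www.w3.org/2004/02/skos/core#")]
def pvTarget (es : List String) : List (String × String) :=
  sortedKp.filter (fun kv => pvPB es kv.1)

theorem pv_insertBy_congr {α : Type} (p q : α → α → Bool) (x : α) (ys : List α)
    (h : ∀ y ∈ ys, p x y = q x y) :
    PySem.List.insertBy p x ys = PySem.List.insertBy q x ys := by
  induction ys with
  | nil => rfl
  | cons y ys ih =>
    simp only [PySem.List.insertBy]
    rw [h y (by simp)]
    split
    · rfl
    · rw [ih (fun z hz => h z (by simp [hz]))]

theorem pv_foldl_insertBy_congr {α : Type} (p q : α → α → Bool) :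
    ∀ (xs acc : List α),
      (∀ x ∈ xs, ∀ y ∈ acc, p x y = q x y) → (∀ x ∈ xs, ∀ y ∈ xs, p x y = q x y) →
      xs.foldl (fun a x => PySem.List.insertBy p x a) acc
        = xs.foldl (fun a x => PySem.List.insertBy q x a) acc := by
  intro xs
  induction xs with
  | nil => intro acc _ _; rfl
  | cons x xs ih =>
    intro acc hacc hxs
    simp only [List.foldl_cons]
    rw [pv_insertBy_congr p q x acc (fun y hy => hacc x (by simp) y hy)]
    apply ih
    · intro z hz y hy
      rcases (PySem.List.mem_insertBy q x y acc).1 hy with h | h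
      · rw [h]; exact hxs z (by simp [hz]) x (by simp)
      · exact hacc z (by simp [hz]) y h
    · intro z hz y hy; exact hxs z (by simp [hz]) y (by simp [hy])

theorem pv_sorted2_key (xs ys : List (String × String))
    (hnd : (xs.map Prod.fst).Nodup) (hperm : ys.Perm xs)
    (hp : ys.Pairwise (fun a b => a.1 < b.1)) :
    PySem.List.sorted2 xs (fun kv => kv.1) (fun kv => kv.2) false = ys := by
  have hagree : ∀ x ∈ xs, ∀ y ∈ xs,
      (decide (x.1 < y.1) || (!decide (y.1 < x.1) && decide (x.2 < y.2)))
        = decide (x.1 < y.1) := by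
    intro x hx y hy
    by_cases hk : x.1 = y.1
    · have hxy : x = y := List.inj_on_of_nodup_map hnd hx hy hk
      subst hxy
      simp
    · rcases lt_or_gt_of_ne hk with h | h
      · simp [h, asymm h]
      · simp [h, asymm h]
  have h1 : PySem.List.sorted2 xs (fun kv => kv.1) (fun kv => kv.2) false
      = xs.foldl (fun a x => PySem.List.insertBy
          (fun a b => decide (a.1 < b.1) || (!decide (b.1 < a.1) && decide (a.2 < b.2))) x a) [] := rfl
  have h2 : PySem.List.sorted xs (fun kv => kv.1) false
      = xs.foldl (fun a x => PySem.List.insertBy (fun a b => decide (a.1 < b.1)) x a) [] :=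
    PySem.List.sorted_eq_foldl_insertBy xs (fun kv => kv.1)
  rw [h1, pv_foldl_insertBy_congr _ _ xs []
      (by intro x _ y hy; simp at hy) (by intro x hx y hy; exact hagree x hx y hy), ← h2]
  exact PySem.List.sorted_eq_of_perm_of_pairwise_lt xs ys (fun kv => kv.1) hperm hp

theorem pv_go_len_ge (sep : List Char) :
    ∀ (fuel : Nat) (l cur : List Char) (acc : List (List Char)),
      acc.length + 1 ≤ (PySem.Chars.splitOn.go sep fuel l cur acc).length := by
  intro fuel
  induction fuel with
  | zero => intro l cur acc; simp [PySem.Chars.splitOn.go]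
  | succ n ih =>
    intro l cur acc
    cases l with
    | nil => simp [PySem.Chars.splitOn.go]
    | cons c rest =>
      show (if sep.isPrefixOf (c :: rest)
          then PySem.Chars.splitOn.go sep n (List.drop sep.length (c :: rest)) [] (cur.reverse :: acc)
          else PySem.Chars.splitOn.go sep n rest (c :: cur) acc).length ≥ acc.length + 1
      split
      · calc acc.length + 1 ≤ (cur.reverse :: acc).length + 1 := by simp
          _ ≤ _ := ih _ _ _
      · exact ih _ _ _

theorem pv_go_len (sep : List Char) (hs : sep ≠ []) :
    ∀ (fuel : Nat) (l cur : List Char) (acc : List (List Char)), l.length < fuel →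
      ((PySem.Chars.splitOn.go sep fuel l cur acc).length = acc.length + 1 ↔ ¬ sep <:+: l) := by
  intro fuel
  induction fuel with
  | zero => intro l cur acc h; omega
  | succ n ih =>
    intro l cur acc h
    cases l with
    | nil =>
      simp only [PySem.Chars.splitOn.go]
      simp [List.infix_nil, hs]
    | cons c rest =>
      show ((if sep.isPrefixOf (c :: rest)
          then PySem.Chars.splitOn.go sep n (List.drop sep.length (c :: rest)) [] (cur.reverse :: acc)
          else PySem.Chars.splitOn.go sep n rest (c :: cur) acc).length = acc.length + 1
          ↔ ¬ sep <:+: (c :: rest))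
      by_cases hpre : sep.isPrefixOf (c :: rest) = true
      · rw [if_pos hpre]
        have h1 := pv_go_len_ge sep n (List.drop sep.length (c :: rest)) [] (cur.reverse :: acc)
        have h2 : sep <:+: (c :: rest) := (List.isPrefixOf_iff_prefix.1 hpre).isInfix
        constructor
        · intro hlen; exfalso; simp at h1; omega
        · intro hn; exact absurd h2 hn
      · rw [if_neg hpre]
        have hrest : rest.length < n := by simp at h; omega
        rw [ih rest (c :: cur) acc hrest]
        have hnp : ¬ sep <+: (c :: rest) := fun hp => hpre (List.isPrefixOf_iff_prefix.2 hp)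
        rw [List.infix_cons_iff]
        tauto

theorem pv_guard (e : String) :
    PySem.Str.isIn ":" e = decide (2 ≤ (((PySem.Str.split? e ":").getD []).length)) := by
  have hsplit : PySem.Str.split? e ":" =
      some ((PySem.Chars.splitOn e.toList [':']).map String.ofList) := by
    simp [PySem.Str.split?, PySem.Chars.split?]
  rw [hsplit]
  have hlen1 := pv_go_len_ge [':'] (e.toList.length + 1) e.toList [] []
  have hlen := pv_go_len [':'] (by simp) (e.toList.length + 1) e.toList [] [] (by omega)
  have hgo : PySem.Chars.splitOn.go [':'] (e.toList.length + 1) e.toList [] []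
      = PySem.Chars.splitOn e.toList [':'] := rfl
  rw [hgo] at hlen1 hlen
  have hIn : PySem.Str.isIn ":" e = PySem.Chars.isIn [':'] e.toList := rfl
  rw [hIn]
  by_cases hinf : [':'] <:+: e.toList
  · have hb : PySem.Chars.isIn [':'] e.toList = true :=
      (PySem.Chars.isIn_iff_infix [':'] e.toList).2 hinf
    rw [hb]
    have h1 : ¬ ((PySem.Chars.splitOn e.toList [':']).length = 1) := fun hone =>
      (hlen.1 (by simpa using hone)) hinf
    have h2 : 1 ≤ (PySem.Chars.splitOn e.toList [':']).length := by simpa using hlen1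
    have h3 : 2 ≤ (PySem.Chars.splitOn e.toList [':']).length := by omega
    simp only [Option.getD_some, List.length_map]
    simp [h3]
  · have hb : PySem.Chars.isIn [':'] e.toList = false := by
      rw [← Bool.not_eq_true]
      exact fun h => hinf ((PySem.Chars.isIn_iff_infix [':'] e.toList).1 h)
    rw [hb]
    have h1 : (PySem.Chars.splitOn e.toList [':']).length = 1 := by
      simpa using hlen.2 hinf
    simp only [Option.getD_some, List.length_map]
    simp [h1]

-- facts about the literal known-prefix table
theorem kpKeysNodup : kpMap.keys.Nodup := by decide
theorem kpItemsNodupKeys : (kpMap.items.map Prod.fst).Nodup := by decide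
theorem kpPermSorted : kpMap.items.Perm sortedKp := by decide
theorem sortedKpPairwise : sortedKp.Pairwise (fun a b => a.1 < b.1) := by
  have h : sortedKp.Pairwise (fun a b => a.1.toList < b.1.toList) := by decide
  exact h.imp (fun hab => String.lt_iff_toList_lt.2 hab)

-- a key of kpMap determines its pair
theorem kpValDet {k : String} {v w : String}
    (h1 : (k, v) ∈ kpMap.items) (h2 : (k, w) ∈ kpMap.items) : v = w := by
  have e1 := PySem.Dict.get?_of_mem_items kpMap h1 kpKeysNodup
  have e2 := PySem.Dict.get?_of_mem_items kpMap h2 kpKeysNodup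
  rw [e1] at e2; exact Option.some.inj e2

theorem pvPrefs_cons_pos {e : String} (es : List String) (hg : 2 ≤ (pvParts e).length) :
    pvPrefs (e :: es) = pvPref e :: pvPrefs es := by
  simp [pvPrefs, hg]

theorem pvPrefs_cons_neg {e : String} (es : List String) (hg : ¬ 2 ≤ (pvParts e).length) :
    pvPrefs (e :: es) = pvPrefs es := by
  simp [pvPrefs, hg]

theorem pv_contains_exists {d : PySem.Dict String String} {k : String}
    (h : d.contains k = true) : ∃ v, d.get? k = some v ∧ (k, v) ∈ d.items := by
  rw [PySem.Dict.contains_eq_isSome_get?] at h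
  rcases Option.isSome_iff_exists.1 h with ⟨v, hv⟩
  exact ⟨v, hv, PySem.Dict.mem_items_of_get?_eq_some d hv⟩

theorem pv_foldA (es : List String) :
    ∀ (d : PySem.Dict String String), d.keys.Nodup → (∀ kv ∈ d.items, kv ∈ kpMap.items) →
      (es.foldl stepA d).keys.Nodup ∧ (∀ kv ∈ (es.foldl stepA d).items, kv ∈ kpMap.items) ∧
      (∀ kv, kv ∈ (es.foldl stepA d).items ↔
        kv ∈ d.items ∨ (kv ∈ kpMap.items ∧ kv.1 ∈ pvPrefs es)) := by
  induction es with
  | nil =>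
    intro d hnd hsub
    refine ⟨hnd, hsub, fun kv => ?_⟩
    simp [pvPrefs]
  | cons e es ih =>
    intro d hnd hsub
    simp only [List.foldl_cons]
    by_cases hg : 2 ≤ (pvParts e).length
    · rw [pvPrefs_cons_pos es hg]
      by_cases hkp : kpMap.contains (pvPref e) = true
      · by_cases hdc : d.contains (pvPref e) = true
        · have hstep : stepA d e = d := by
            simp only [stepA]
            rw [show (PySem.Str.split? e ":").getD [] = pvParts e from rfl,
              show PySem.List.pyGetD (pvParts e) 0 "" = pvPref e from rfl,
              if_pos hg, hkp, hdc]
            simp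
          rw [hstep]
          obtain ⟨h1, h2, h3⟩ := ih d hnd hsub
          refine ⟨h1, h2, fun kv => ?_⟩
          rw [h3 kv]
          rcases pv_contains_exists hdc with ⟨v, _, hvd⟩
          constructor
          · rintro (h | ⟨hkv, hmem⟩)
            · exact Or.inl h
            · exact Or.inr ⟨hkv, List.mem_cons_of_mem _ hmem⟩
          · rintro (h | ⟨hkv, hmem⟩)
            · exact Or.inl h
            · rcases List.mem_cons.1 hmem with hh | hh
              · -- kv.1 = pvPref e: kv is already in d
                have hvkp : (pvPref e, v) ∈ kpMap.items := hsub _ hvd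
                have : v = kv.2 := kpValDet hvkp (by rw [← hh]; exact hkv)
                have : kv = (pvPref e, v) := by
                  cases kv; simp_all
                exact Or.inl (this ▸ hvd)
              · exact Or.inr ⟨hkv, hh⟩
        · have hdcf : d.contains (pvPref e) = false := by
            revert hdc; cases d.contains (pvPref e) <;> simp
          have hstep : stepA d e = d.insert (pvPref e) (kpMap.getD (pvPref e) "") := by
            simp only [stepA]
            rw [show (PySem.Str.split? e ":").getD [] = pvParts e from rfl,
              show PySem.List.pyGetD (pvParts e) 0 "" = pvPref e from rfl,
              if_pos hg, hkp, hdcf]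
            simp
          rcases pv_contains_exists hkp with ⟨v, hget, hvkp⟩
          have hvD : kpMap.getD (pvPref e) "" = v := by
            rw [PySem.Dict.getD_eq_get?_getD, hget]; rfl
          have hitems : (d.insert (pvPref e) v).items = d.items ++ [(pvPref e, v)] :=
            PySem.Dict.items_insert_of_not_contains d v hdcf
          rw [hstep, hvD]
          obtain ⟨h1, h2, h3⟩ := ih (d.insert (pvPref e) v)
            (PySem.Dict.nodup_keys_insert d _ _ hnd)
            (by intro kv hkv
                rw [hitems] at hkv
                rcases List.mem_append.1 hkv with h | h
                · exact hsub _ h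
                · simp at h; rw [h]; exact hvkp)
          refine ⟨h1, h2, fun kv => ?_⟩
          rw [h3 kv, hitems]
          constructor
          · rintro (h | ⟨hkv, hmem⟩)
            · rcases List.mem_append.1 h with h' | h'
              · exact Or.inl h'
              · simp at h'
                refine Or.inr ⟨by rw [h']; exact hvkp, by rw [h']; exact List.mem_cons_self⟩
            · exact Or.inr ⟨hkv, List.mem_cons_of_mem _ hmem⟩
          · rintro (h | ⟨hkv, hmem⟩)
            · exact Or.inl (List.mem_append.2 (Or.inl h))
            · rcases List.mem_cons.1 hmem with hh | hh
              · have : v = kv.2 := kpValDet hvkp (by rw [← hh]; exact hkv)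
                have hkv2 : kv = (pvPref e, v) := by cases kv; simp_all
                exact Or.inl (List.mem_append.2 (Or.inr (by simp [hkv2])))
              · exact Or.inr ⟨hkv, hh⟩
      · have hstep : stepA d e = d := by
          simp only [stepA]
          rw [show (PySem.Str.split? e ":").getD [] = pvParts e from rfl,
            show PySem.List.pyGetD (pvParts e) 0 "" = pvPref e from rfl,
            if_pos hg]
          have hkpf : kpMap.contains (pvPref e) = false := by
            revert hkp; cases kpMap.contains (pvPref e) <;> simp
          simp [hkpf]
        rw [hstep]
        obtain ⟨h1, h2, h3⟩ := ih d hnd hsub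
        refine ⟨h1, h2, fun kv => ?_⟩
        rw [h3 kv]
        have hnotkey : ∀ kv : String × String, kv ∈ kpMap.items → kv.1 ≠ pvPref e := by
          intro kv hkv he
          exact hkp ((PySem.Dict.contains_iff_mem_keys kpMap _).2
            (he ▸ PySem.Dict.mem_keys_of_mem_items kpMap hkv))
        constructor
        · rintro (h | ⟨hkv, hmem⟩)
          · exact Or.inl h
          · exact Or.inr ⟨hkv, List.mem_cons_of_mem _ hmem⟩
        · rintro (h | ⟨hkv, hmem⟩)
          · exact Or.inl h
          · rcases List.mem_cons.1 hmem with hh | hh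
            · exact absurd hh (hnotkey kv hkv)
            · exact Or.inr ⟨hkv, hh⟩
    · have hstep : stepA d e = d := by
        simp only [stepA]
        rw [show (PySem.Str.split? e ":").getD [] = pvParts e from rfl, if_neg hg]
      rw [hstep, pvPrefs_cons_neg es hg]
      exact ih d hnd hsub

theorem pv_stepStd (d : PySem.Dict String String) (p : String)
    (hkp : kpMap.contains p = true) (hnd : d.keys.Nodup)
    (hsub : ∀ kv ∈ d.items, kv ∈ kpMap.items) :
    (stepStd d p).keys.Nodup ∧ (∀ kv ∈ (stepStd d p).items, kv ∈ kpMap.items) ∧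
    (∀ kv, kv ∈ (stepStd d p).items ↔ kv ∈ d.items ∨ (kv ∈ kpMap.items ∧ kv.1 = p)) := by
  rcases pv_contains_exists hkp with ⟨v, hget, hvkp⟩
  by_cases hdc : d.contains p = true
  · have hstep : stepStd d p = d := by simp [stepStd, hdc]
    rw [hstep]
    rcases pv_contains_exists hdc with ⟨w, _, hwd⟩
    refine ⟨hnd, hsub, fun kv => ?_⟩
    constructor
    · exact Or.inl
    · rintro (h | ⟨hkv, hp1⟩)
      · exact h
      · have hwkp : (p, w) ∈ kpMap.items := hsub _ hwd
        have : w = kv.2 := kpValDet hwkp (by rw [← hp1]; exact hkv)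
        have hkv2 : kv = (p, w) := by cases kv; simp_all
        exact hkv2 ▸ hwd
  · have hvD : kpMap.getD p "" = v := by rw [PySem.Dict.getD_eq_get?_getD, hget]; rfl
    have hstep : stepStd d p = d.insert p v := by simp [stepStd, hdc, hvD]
    have hitems : (d.insert p v).items = d.items ++ [(p, v)] :=
      PySem.Dict.items_insert_of_not_contains d v (by simpa using hdc)
    rw [hstep]
    refine ⟨PySem.Dict.nodup_keys_insert d _ _ hnd, ?_, fun kv => ?_⟩
    · intro kv hkv
      rw [hitems] at hkv
      rcases List.mem_append.1 hkv with h | h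
      · exact hsub _ h
      · simp at h; rw [h]; exact hvkp
    · rw [hitems]
      constructor
      · intro h
        rcases List.mem_append.1 h with h' | h'
        · exact Or.inl h'
        · simp at h'
          exact Or.inr ⟨by rw [h']; exact hvkp, by rw [h']⟩
      · rintro (h | ⟨hkv, hp1⟩)
        · exact List.mem_append.2 (Or.inl h)
        · have : v = kv.2 := kpValDet hvkp (by rw [← hp1]; exact hkv)
          have hkv2 : kv = (p, v) := by cases kv; simp_all
          exact List.mem_append.2 (Or.inr (by simp [hkv2]))

-- ===== VERDICT (by name: the statement is the Claim_ definition above) =====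
theorem collect_prefixes_py_spec : Claim_equal_collect_prefixes_py := by
  intro entities _
  unfold Spec_collect_prefixes_py collect_prefixes_py collect_prefixes_py_alt
  -- A side: describe the final dict
  obtain ⟨hnd0, hsub0, hmem0⟩ := pv_foldA entities PySem.Dict.empty (by decide) (by decide)
  obtain ⟨hnd1, hsub1, hmem1⟩ := pv_stepStd (entities.foldl stepA PySem.Dict.empty) "skos" (by decide) hnd0 hsub0
  obtain ⟨hnd2, hsub2, hmem2⟩ := pv_stepStd (stepStd (entities.foldl stepA PySem.Dict.empty) "skos") "semapv" (by decide) hnd1 hsub1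
  have hfold2 : ["skos", "semapv"].foldl stepStd (entities.foldl stepA PySem.Dict.empty)
      = stepStd (stepStd (entities.foldl stepA PySem.Dict.empty) "skos") "semapv" := rfl
  set X := stepStd (stepStd (entities.foldl stepA PySem.Dict.empty) "skos") "semapv" with hX
  -- the canonical filtered list
  have hmemX : ∀ kv : String × String, kv ∈ X.items ↔
      kv ∈ kpMap.items ∧ pvPB entities kv.1 = true := by
    intro kv
    rw [hmem2 kv, hmem1 kv, hmem0 kv]
    simp only [pvPB, Bool.or_eq_true, decide_eq_true_eq, beq_iff_eq]
    constructor
    · rintro (((h | ⟨h1, h2⟩) | ⟨h1, h2⟩) | ⟨h1, h2⟩)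
      · simp [PySem.Dict.empty] at h
      · exact ⟨h1, Or.inl h2⟩
      · exact ⟨h1, Or.inr (Or.inl h2)⟩
      · exact ⟨h1, Or.inr (Or.inr h2)⟩
    · rintro ⟨h1, h2 | h2 | h2⟩
      · exact Or.inl (Or.inl (Or.inr ⟨h1, h2⟩))
      · exact Or.inl (Or.inr ⟨h1, h2⟩)
      · exact Or.inr ⟨h1, h2⟩
  have hXnodup : (X.items.map Prod.fst).Nodup := hnd2
  have hXitemsNodup : X.items.Nodup := hXnodup.of_map
  have hLmem : ∀ kv : String × String,
      kv ∈ kpMap.items.filter (fun kv => pvPB entities kv.1) ↔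
      kv ∈ kpMap.items ∧ pvPB entities kv.1 = true := fun kv => List.mem_filter
  have hLnodup : (kpMap.items.filter (fun kv => pvPB entities kv.1)).Nodup :=
    (kpItemsNodupKeys.of_map).sublist List.filter_sublist
  have hXL : X.items.Perm (kpMap.items.filter (fun kv => pvPB entities kv.1)) :=
    (List.perm_ext_iff_of_nodup hXitemsNodup hLnodup).2
      (fun kv => (hmemX kv).trans (hLmem kv).symm)
  have hLT : (kpMap.items.filter (fun kv => pvPB entities kv.1)).Perm (pvTarget entities) :=
    kpPermSorted.filter _
  have hTpair : (pvTarget entities).Pairwise (fun a b => a.1 < b.1) :=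
    sortedKpPairwise.sublist List.filter_sublist
  have hAside : PySem.List.sorted2 X.items (fun kv => kv.1) (fun kv => kv.2) false
      = pvTarget entities :=
    pv_sorted2_key X.items (pvTarget entities) hXnodup (hXL.trans hLT).symm hTpair
  -- B side
  have hBpred : (fun kv : String × String => PySem.Set.contains
        (PySem.Set.ofList ((entities.filter (fun e => PySem.Str.isIn ":" e)).map
          (fun e => PySem.List.pyGetD ((PySem.Str.split? e ":").getD []) 0 ""))) kv.1
        || (kv.1 == "skos" || kv.1 == "semapv"))
      = (fun kv : String × String => pvPB entities kv.1) := by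
    funext kv
    have hfilter : entities.filter (fun e => PySem.Str.isIn ":" e)
        = entities.filter (fun e => decide (2 ≤ (pvParts e).length)) :=
      List.filter_congr (fun e _ => pv_guard e)
    rw [hfilter]
    have hlist : (entities.filter (fun e => decide (2 ≤ (pvParts e).length))).map
        (fun e => PySem.List.pyGetD ((PySem.Str.split? e ":").getD []) 0 "") = pvPrefs entities := rfl
    rw [hlist]
    have hcont : PySem.Set.contains (PySem.Set.ofList (pvPrefs entities)) kv.1
        = decide (kv.1 ∈ pvPrefs entities) := by
      rw [PySem.Set.contains_eq_decide]
      simp [PySem.Set.mem_ofList]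
    rw [hcont]
    rfl
  have hBlistNodup : ((kpMap.items.filter (fun kv => pvPB entities kv.1)).map Prod.fst).Nodup :=
    kpItemsNodupKeys.sublist (List.filter_sublist.map Prod.fst)
  have hBside : PySem.List.sorted2 (kpMap.items.filter (fun kv => pvPB entities kv.1))
      (fun kv => kv.1) (fun kv => kv.2) false = pvTarget entities :=
    pv_sorted2_key _ (pvTarget entities) hBlistNodup hLT.symm hTpair
  simp only [hfold2]
  rw [hAside, hBpred, hBside]
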